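-- pv_equiv track=rewrite | github.com/sharifkhan96/Leetcode-problems-from-easy-to-hard | inPlaceArrayOps.py | evenSquare
-- ===== SOURCE A (Python) =====
-- def evenSquare(array1: list) -> list:
--     if array1 is None:
--         return None
--
--     array_new = []
--
--     for i in range(len(array1)):
--
--         element = array1[i]
--         if i % 2 == 0:
--             element *= element
--         array_new.append(element)
--     return array_new
-- ===== SOURCE B (Python) =====
-- def evenSquare(array1: list) -> list:
--     if array1 is None:
--         return None
--     out = list(array1)
--     out[::2] = [x * x for x in array1[::2]]
--     return out
-- ===== Notes on version B (the rewrite author's own statement) =====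
-- stated objective: idiomatic
-- what changed: Replaces the index loop with its i%2 branch by a shallow copy plus one stride-2 slice assignment of the squared even-index elements.
import Mathlib
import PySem

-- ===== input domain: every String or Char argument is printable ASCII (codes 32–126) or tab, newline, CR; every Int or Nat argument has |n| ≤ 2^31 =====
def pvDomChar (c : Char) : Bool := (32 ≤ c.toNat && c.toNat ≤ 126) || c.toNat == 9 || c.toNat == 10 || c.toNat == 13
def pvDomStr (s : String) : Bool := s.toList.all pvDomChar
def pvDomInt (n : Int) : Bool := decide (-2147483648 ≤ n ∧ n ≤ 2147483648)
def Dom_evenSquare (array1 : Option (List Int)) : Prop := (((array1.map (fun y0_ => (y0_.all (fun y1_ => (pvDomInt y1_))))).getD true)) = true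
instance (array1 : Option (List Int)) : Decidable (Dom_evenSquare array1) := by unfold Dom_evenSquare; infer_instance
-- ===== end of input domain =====

-- B replaces the index loop with its i%2 branch by a copy plus one stride-2 slice assignment (idiomatic; same cost).


-- ===== PORT A =====
-- for i in range(len(array1)): element = array1[i]; if i % 2 == 0: element *= element; array_new.append(element)
def evenSquare (array1 : Option (List Int)) : Option (List Int) :=
  match array1 with
  | none => none
  | some xs =>
    some ((PySem.List.pyRange 0 (xs.length : Int) 1).foldl
      (fun array_new i =>
        let element := PySem.List.pyGetD xs i 0   -- i always in range here
        let element := if PySem.Int.mod i 2 == 0 then element * element else element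
        array_new ++ [element]) [])

-- ===== PORT B =====
-- xs[::2]  (exact hand port of a step-2 full slice: every other element from index 0)
def pvStride2 : List Int → List Int
  | [] => []
  | [x] => [x]
  | x :: _ :: rest => x :: pvStride2 rest

-- out[::2] = vs on a copy of xs (vs has exactly one value per even position)
def pvSetEvens : List Int → List Int → List Int
  | [], _ => []
  | xs, [] => xs
  | [_], v :: _ => [v]
  | _ :: y :: rest, v :: vs => v :: y :: pvSetEvens rest vs

def evenSquare_alt (array1 : Option (List Int)) : Option (List Int) :=
  match array1 with
  | none => none
  | some xs => some (pvSetEvens xs ((pvStride2 xs).map (fun x => x * x)))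

-- ===== PRECONDITION & SPEC =====
def Spec_evenSquare (array1 : Option (List Int)) (out : Option (List Int)) : Prop := out = evenSquare_alt array1
instance (array1 : Option (List Int)) (out : Option (List Int)) : Decidable (Spec_evenSquare array1 out) := by unfold Spec_evenSquare; infer_instance

-- ===== CLAIM (what is proved, stated in full; the proofs are below) =====
def Claim_equal_evenSquare : Prop := ∀ (array1 : Option (List Int)), Dom_evenSquare array1 → Spec_evenSquare array1 (evenSquare array1)

-- ===== LEMMAS AND PROOFS =====

-- common reference value: square at even indices
def pvRef (xs : List Int) : List Int := xs.mapIdx (fun i x => if i % 2 = 0 then x * x else x)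

theorem pvRef_cons_cons (x y : Int) (rest : List Int) :
    pvRef (x :: y :: rest) = x * x :: y :: pvRef rest := by
  simp only [pvRef, List.mapIdx_cons]
  refine congrArg₂ List.cons (by norm_num) (congrArg₂ List.cons (by norm_num) ?_)
  apply List.ext_getElem
  · simp
  · intro i h1 h2
    simp only [List.getElem_mapIdx]
    rcases Nat.mod_two_eq_zero_or_one i with h | h <;> simp [Nat.add_mod, h]

-- B side: copy + stride-2 assignment equals the reference
theorem pvB_eq_ref (xs : List Int) :
    pvSetEvens xs ((pvStride2 xs).map (fun x => x * x)) = pvRef xs := by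
  induction xs using pvStride2.induct with
  | case1 => rfl
  | case2 x => simp [pvStride2, pvSetEvens, pvRef]
  | case3 x y rest ih =>
      simp only [pvStride2, List.map_cons, pvSetEvens, pvRef_cons_cons]
      rw [ih]

-- A side: the index fold equals the reference
theorem pvA_eq_ref (xs : List Int) :
    (PySem.List.pyRange 0 (xs.length : Int) 1).foldl
      (fun array_new i =>
        let element := PySem.List.pyGetD xs i 0
        let element := if PySem.Int.mod i 2 == 0 then element * element else element
        array_new ++ [element]) [] = pvRef xs := by
  rw [PySem.List.foldl_append_singleton_eq_map]
  rw [PySem.List.pyRange_one 0 (xs.length : Int)]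
  simp only [sub_zero, Int.toNat_natCast, List.map_map]
  apply List.ext_getElem
  · simp [pvRef]
  · intro i h1 h2
    have hi : i < xs.length := by simpa [pvRef] using h2
    simp only [List.nil_append, List.getElem_map, List.getElem_range, Function.comp_apply, zero_add]
    simp only [pvRef, List.getElem_mapIdx]
    rw [PySem.List.pyGetD_natCast]
    have hm : PySem.Int.mod (i : Int) 2 = ((i % 2 : Nat) : Int) := PySem.Int.mod_natCast i 2
    rw [hm]
    rcases Nat.mod_two_eq_zero_or_one i with h | h <;> simp [h, List.getElem?_eq_getElem hi]

-- ===== VERDICT (by name: the statement is the Claim_ definition above) =====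
theorem evenSquare_spec : Claim_equal_evenSquare := by
  intro array1 _
  unfold Spec_evenSquare
  cases array1 with
  | none => rfl
  | some xs =>
    simp only [evenSquare, evenSquare_alt]
    rw [pvA_eq_ref, pvB_eq_ref]
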